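-- pv_equiv track=rewrite | github.com/miczho/competitive-coding | kick-start-21-h-2.py | painter
-- ===== SOURCE A (Python) =====
-- def painter(n, p):
--     valid = [set(['R', 'O', 'P', 'A']), set(['Y', 'O', 'G', 'A']), set(['B', 'P', 'G', 'A'])]
--     ans = 0
--
--     for a in valid:
--         paint = False
--         for b in p:
--             if b in a and not paint:
--                 paint = True
--                 ans += 1
--             elif b not in a and paint:
--                 paint = False
--
--     return ans
-- ===== SOURCE B (Python) =====
-- def painter(n, p):
--     valid = [{'R', 'O', 'P', 'A'}, {'Y', 'O', 'G', 'A'}, {'B', 'P', 'G', 'A'}]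
--     ans = 0
--     for a in valid:
--         # count run starts: positions whose color is in the set while the previous one is not
--         ans += sum(1 for prev, cur in zip([None] + list(p), p)
--                    if cur in a and prev not in a)
--     return ans
-- ===== Notes on version B (the rewrite author's own statement) =====
-- stated objective: idiomatic
-- what changed: Replaces the toggling paint-flag state machine by stateless run-start counting: pair each color with its predecessor via zip and count positions that are in the set while the predecessor is not.
import Mathlib
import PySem

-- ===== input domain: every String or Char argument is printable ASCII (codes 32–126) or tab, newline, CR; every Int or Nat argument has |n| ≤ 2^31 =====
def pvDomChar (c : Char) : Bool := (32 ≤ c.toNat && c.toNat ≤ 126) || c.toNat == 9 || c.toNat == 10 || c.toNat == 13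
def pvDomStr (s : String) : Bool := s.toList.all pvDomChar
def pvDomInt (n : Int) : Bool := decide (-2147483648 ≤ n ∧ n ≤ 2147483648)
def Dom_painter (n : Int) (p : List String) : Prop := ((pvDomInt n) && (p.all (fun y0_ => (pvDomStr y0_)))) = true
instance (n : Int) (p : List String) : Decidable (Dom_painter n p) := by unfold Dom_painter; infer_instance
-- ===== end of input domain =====

-- B replaces A's toggling paint-flag state machine by stateless run-start counting
-- over predecessor pairs (idiomatic; same O(n) cost, return value identical).

-- ===== PORT A =====
-- the three valid colour sets (Python: list of set literals)
def pvValid : List (PySem.Set String) :=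
  [PySem.Set.ofList ["R", "O", "P", "A"],
   PySem.Set.ofList ["Y", "O", "G", "A"],
   PySem.Set.ofList ["B", "P", "G", "A"]]

-- A's inner loop: state (paint, ans), the three branches in A's order
def pvStepA (a : PySem.Set String) (st : Bool × Int) (b : String) : Bool × Int :=
  if PySem.Set.contains a b && !st.1 then (true, st.2 + 1)
  else if !(PySem.Set.contains a b) && st.1 then (false, st.2)
  else st

def painter (n : Int) (p : List String) : Int :=
  (pvValid.foldl (fun ans a => (p.foldl (pvStepA a) (false, ans)).2) 0)

-- ===== PORT B =====
-- prev not in a, where prev may be None (the sentinel before the first colour)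
def pvOptMem (a : PySem.Set String) : Option String → Bool
  | some x => PySem.Set.contains a x
  | none => false

-- sum(1 for prev, cur in zip([None]+list(p), p) if cur in a and prev not in a)
def pvRunStarts (a : PySem.Set String) (p : List String) : Int :=
  ((((none :: p.map some).zip p).filter
      (fun pc => PySem.Set.contains a pc.2 && !(pvOptMem a pc.1))).length : Int)

def painter_alt (n : Int) (p : List String) : Int :=
  pvValid.foldl (fun ans a => ans + pvRunStarts a p) 0

-- ===== PRECONDITION & SPEC =====
def Spec_painter (n : Int) (p : List String) (out : Int) : Prop := out = painter_alt n p
instance (n : Int) (p : List String) (out : Int) : Decidable (Spec_painter n p out) := by unfold Spec_painter; infer_instance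

-- ===== CLAIM (what is proved, stated in full; the proofs are below) =====
def Claim_equal_painter : Prop := ∀ (n : Int) (p : List String), Dom_painter n p → Spec_painter n p (painter n p)

-- ===== LEMMAS AND PROOFS =====

-- one step of A: the new paint flag is exactly membership of the current colour
theorem pvStepA_eq (a : PySem.Set String) (st : Bool × Int) (b : String) :
    pvStepA a st b =
      (PySem.Set.contains a b,
       st.2 + if PySem.Set.contains a b && !st.1 then 1 else 0) := by
  unfold pvStepA
  cases h : PySem.Set.contains a b <;> cases hst : st.1 <;>
    simp <;> cases st <;> simp_all

-- A's inner fold from carry (c, k) equals k plus B's count with sentinel o, optMem o = c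
theorem pvInner (a : PySem.Set String) :
    ∀ (p : List String) (c : Bool) (k : Int) (o : Option String),
      pvOptMem a o = c →
      (p.foldl (pvStepA a) (c, k)).2 =
        k + ((((o :: p.map some).zip p).filter
              (fun pc => PySem.Set.contains a pc.2 && !(pvOptMem a pc.1))).length : Int)
  | [], c, k, o, h => by simp
  | b :: bs, c, k, o, h => by
    have ih := pvInner a bs (PySem.Set.contains a b)
      (k + if PySem.Set.contains a b && !c then 1 else 0) (some b) rfl
    simp only [List.foldl_cons, pvStepA_eq, List.map_cons, List.zip_cons_cons,
      List.filter_cons, h]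
    rw [ih]
    split_ifs <;> simp <;> push_cast <;> ring

-- ===== VERDICT (by name: the statement is the Claim_ definition above) =====
theorem painter_spec : Claim_equal_painter := by
  intro n p _
  unfold Spec_painter painter painter_alt pvValid pvRunStarts
  simp only [List.foldl_cons, List.foldl_nil]
  rw [pvInner _ p false 0 none rfl]
  rw [pvInner _ p false _ none rfl]
  rw [pvInner _ p false _ none rfl]
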